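-- pv_equiv track=rewrite | github.com/pypi-data/pypi-mirror-395 | packages/muck-out/muck_out-0.3.15-py3-none-any.whl/muck_out/derived/util.py | determine_html_url
-- ===== SOURCE A (Python) =====
-- from typing import Any
--
-- def determine_html_url(urls: list[dict[str, Any]]) -> str | None:
--     for url in urls:
--         if url.get("mediaType") == "text/html":
--             if url.get("href"):
--                 return url.get("href")
--     for url in urls:
--         if url.get("href"):
--             return url.get("href")
--     return None
-- ===== SOURCE B (Python) =====
-- def determine_html_url(urls):
--     first_href = None
--     for url in urls:
--         href = url.get("href")
--         if href:
--             if url.get("mediaType") == "text/html":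
--                 return href
--             if first_href is None:
--                 first_href = href
--     return first_href
-- ===== Notes on version B (the rewrite author's own statement) =====
-- stated objective: simpler
-- what changed: Replaces A's two sequential scans with one single pass that returns a text/html href immediately and otherwise records only the first truthy href in an accumulator.
import Mathlib
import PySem

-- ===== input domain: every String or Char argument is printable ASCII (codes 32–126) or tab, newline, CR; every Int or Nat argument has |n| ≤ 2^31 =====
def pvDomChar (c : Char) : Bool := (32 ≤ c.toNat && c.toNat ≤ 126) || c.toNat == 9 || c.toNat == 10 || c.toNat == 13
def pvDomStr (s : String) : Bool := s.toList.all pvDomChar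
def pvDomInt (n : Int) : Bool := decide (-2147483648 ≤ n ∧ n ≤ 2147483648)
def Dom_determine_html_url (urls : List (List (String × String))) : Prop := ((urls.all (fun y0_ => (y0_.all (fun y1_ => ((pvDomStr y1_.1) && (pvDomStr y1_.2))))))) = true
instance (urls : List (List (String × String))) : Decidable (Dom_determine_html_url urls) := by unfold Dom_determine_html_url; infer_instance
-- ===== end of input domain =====

-- B merges A's two sequential scans into one pass with a first-href accumulator (objective: simpler).

-- ===== PORT A =====
-- Python truthiness of url.get("href") (shared by both ports): present and non-empty string.
def pvTruthy (o : Option String) : Bool :=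
  match o with
  | some h => h ≠ ""
  | none => false

-- first for-loop of A: first url with mediaType == "text/html" and truthy href
def pvLoop1 (urls : List (List (String × String))) : Option String :=
  match urls with
  | [] => none
  | u :: rest =>
    if PySem.Dict.get? ⟨u⟩ "mediaType" == some "text/html" then
      if pvTruthy (PySem.Dict.get? ⟨u⟩ "href") then PySem.Dict.get? ⟨u⟩ "href"
      else pvLoop1 rest
    else pvLoop1 rest

-- second for-loop of A: first url with truthy href
def pvLoop2 (urls : List (List (String × String))) : Option String :=
  match urls with
  | [] => none
  | u :: rest =>
    if pvTruthy (PySem.Dict.get? ⟨u⟩ "href") then PySem.Dict.get? ⟨u⟩ "href"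
    else pvLoop2 rest

def determine_html_url (urls : List (List (String × String))) : Option String :=
  match pvLoop1 urls with
  | some h => some h
  | none => pvLoop2 urls

-- ===== PORT B =====
-- single pass carrying first_href (truthiness via shared pvTruthy)
def pvBLoop (urls : List (List (String × String))) (first_href : Option String) : Option String :=
  match urls with
  | [] => first_href
  | u :: rest =>
    let href := PySem.Dict.get? ⟨u⟩ "href"
    if pvTruthy href then
      if PySem.Dict.get? ⟨u⟩ "mediaType" == some "text/html" then href
      else pvBLoop rest (if first_href.isNone then href else first_href)
    else pvBLoop rest first_href

def determine_html_url_alt (urls : List (List (String × String))) : Option String :=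
  pvBLoop urls none

-- ===== PRECONDITION & SPEC =====
def Spec_determine_html_url (urls : List (List (String × String))) (out : Option String) : Prop := out = determine_html_url_alt urls
instance (urls : List (List (String × String))) (out : Option String) : Decidable (Spec_determine_html_url urls out) := by unfold Spec_determine_html_url; infer_instance

-- ===== CLAIM (what is proved, stated in full; the proofs are below) =====
def Claim_equal_determine_html_url : Prop := ∀ (urls : List (List (String × String))), Dom_determine_html_url urls → Spec_determine_html_url urls (determine_html_url urls)

-- ===== LEMMAS AND PROOFS =====
theorem pvBLoop_char (urls : List (List (String × String))) (first_href : Option String) :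
    pvBLoop urls first_href = (pvLoop1 urls).or (first_href.or (pvLoop2 urls)) := by
  induction urls generalizing first_href with
  | nil => cases first_href <;> simp [pvBLoop, pvLoop1, pvLoop2]
  | cons u rest ih =>
    simp only [pvBLoop, pvLoop1, pvLoop2, pvTruthy]
    cases hh : PySem.Dict.get? ⟨u⟩ "href" with
    | none =>
      by_cases hm : PySem.Dict.get? ⟨u⟩ "mediaType" == some "text/html" <;>
        simp [hm, ih]
    | some h =>
      by_cases he : h = ""
      · subst he
        by_cases hm : PySem.Dict.get? ⟨u⟩ "mediaType" == some "text/html" <;>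
          simp [hm, ih]
      · by_cases hm : PySem.Dict.get? ⟨u⟩ "mediaType" == some "text/html"
        · simp [hm, he]
        · cases first_href <;> cases hl : pvLoop1 rest <;>
            simp [hm, he, ih, hl]

-- ===== VERDICT (by name: the statement is the Claim_ definition above) =====
theorem determine_html_url_spec : Claim_equal_determine_html_url := by
  intro urls _
  unfold Spec_determine_html_url determine_html_url determine_html_url_alt
  rw [pvBLoop_char]
  cases h1 : pvLoop1 urls <;> simp
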